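-- pv_equiv track=rewrite | github.com/ckdals3121/Programmers | solutions/LEVEL2/3차 방금그곡/main.py | solution
-- ===== SOURCE A (Python) =====
-- def solution(m, musicinfos):
--     answer = None
--     m = m.replace("C#", 'c').replace("D#", 'd').replace("F#", 'f').replace("G#", 'g').replace("A#", 'a')
--
--     for musicinfo in musicinfos :
--         start, end, title, code = map(str, musicinfo.split(","))
--         start_hour, start_time = map(int, start.split(":"))
--         end_hour, end_time = map(int, end.split(":"))
--
--         time = 60 * (end_hour - start_hour) + (end_time - start_time)
--
--         code = code.replace("C#", 'c').replace("D#", 'd').replace("F#", 'f').replace("G#", 'g').replace("A#", 'a')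
--
--         code = code * ((time // len(code)) + 1)
--         code = code[:time]
--
--
--         if m in code :
--             if answer == None or answer[0] < time or (answer[0] == time and answer[1] > start_hour * 60 + start_time) :
--                 answer = (time, start_hour * 60 + start_time, title)
--
--     if answer == None :
--         return "(None)"
--     return answer[2]
-- ===== SOURCE B (Python) =====
-- def solution(m, musicinfos):
--     m = m.replace("C#", 'c').replace("D#", 'd').replace("F#", 'f').replace("G#", 'g').replace("A#", 'a')
--     plen = len(m)
--     candidates = []
--     for musicinfo in musicinfos:
--         start, end, title, code = musicinfo.split(",")
--         sh, sm = map(int, start.split(":"))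
--         eh, em = map(int, end.split(":"))
--         time = 60 * (eh - sh) + (em - sm)
--         code = code.replace("C#", 'c').replace("D#", 'd').replace("F#", 'f').replace("G#", 'g').replace("A#", 'a')
--         n = len(code)
--         played = time if time > 0 else 0
--         # test the melody by modular index arithmetic on the one-period code,
--         # without ever materialising the repeated/truncated played string
--         if n > 0 and any(all(m[j] == code[(i + j) % n] for j in range(plen))
--                          for i in range(played - plen + 1)):
--             candidates.append((time, sh * 60 + sm, title))
--     if not candidates:
--         return "(None)"
--     return max(candidates, key=lambda c: (c[0], -c[1]))[2]
-- ===== Notes on version B (the rewrite author's own statement) =====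
-- stated objective: alternative
-- what changed: B never materialises the repeated-and-truncated play string: it tests the melody by modular index arithmetic directly on the one-period code (explicit offset/character loops instead of string multiplication, slicing and the built-in substring test), and collects matching tracks into a list reduced afterwards with max(key=(time,-start)) instead of A's in-loop running-best accumulator.
import Mathlib
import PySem

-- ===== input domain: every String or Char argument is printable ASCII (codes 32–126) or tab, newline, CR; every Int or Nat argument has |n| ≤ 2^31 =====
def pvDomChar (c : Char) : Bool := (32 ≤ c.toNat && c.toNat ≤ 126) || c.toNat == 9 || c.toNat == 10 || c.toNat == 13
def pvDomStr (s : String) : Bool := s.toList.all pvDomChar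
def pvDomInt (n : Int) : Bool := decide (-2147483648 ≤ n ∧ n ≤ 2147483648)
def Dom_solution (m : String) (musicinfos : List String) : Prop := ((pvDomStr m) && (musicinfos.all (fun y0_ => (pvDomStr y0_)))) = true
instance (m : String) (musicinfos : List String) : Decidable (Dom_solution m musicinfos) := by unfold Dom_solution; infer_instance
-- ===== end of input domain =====

-- B tests the melody by modular index arithmetic on the one-period code (never building the
-- repeated/truncated play string) and reduces a collected candidate list with max afterwards;
-- alternative structure, similar cost.

-- ===== PORT A =====
-- sharp-note canonicalisation, the replace chain both Pythons apply verbatim to m and to code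
def pvCanon (cs : List Char) : List Char :=
  PySem.Chars.replace (PySem.Chars.replace (PySem.Chars.replace (PySem.Chars.replace
    (PySem.Chars.replace cs ['C','#'] ['c']) ['D','#'] ['d']) ['F','#'] ['f']) ['G','#'] ['g']) ['A','#'] ['a']

-- the parse steps both Pythons perform verbatim on a line: split into 4 fields, parse the two
-- H:MM times, compute time/startMin and the canonical code; none = a line on which both
-- Pythons raise while unpacking/int-parsing (outside Pre_)
def pvParse? (musicinfo : String) : Option (Int × Int × String × List Char) :=
  match PySem.Str.split? musicinfo "," with
  | some [start, stop, title, code] =>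
    match PySem.Str.split? start ":" with
    | some [sh, st] =>
      match PySem.Int.ofStr? sh, PySem.Int.ofStr? st with
      | some startHour, some startTime =>
        match PySem.Str.split? stop ":" with
        | some [eh, et] =>
          match PySem.Int.ofStr? eh, PySem.Int.ofStr? et with
          | some endHour, some endTime =>
            let time := 60 * (endHour - startHour) + (endTime - startTime)
            some (time, startHour * 60 + startTime, title, pvCanon code.toList)
          | _, _ => none
        | _ => none
      | _, _ => none
    | _ => none
  | _ => none

def solution (m : String) (musicinfos : List String) : String :=
  let mc := pvCanon m.toList
  let answer : Option (Int × Int × String) := musicinfos.foldl (fun answer musicinfo =>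
    match pvParse? musicinfo with
    | none => answer
    | some (time, startMin, title, codeC) =>
      if codeC.length = 0 then answer  -- ZeroDivisionError in `time // len(code)`: outside Pre_
      else
        -- code = (code * (time // len(code) + 1))[:time]
        let code := PySem.Chars.slice
          (PySem.List.pyRepeat codeC (PySem.Int.floordiv time (codeC.length : Int) + 1))
          none (some time)
        if PySem.Chars.isIn mc code then
          match answer with
          | none => some (time, startMin, title)
          | some a =>
            if a.1 < time ∨ (a.1 = time ∧ a.2.1 > startMin) then some (time, startMin, title)
            else answer
        else answer) none
  match answer with
  | none => "(None)"
  | some a => a.2.2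

-- ===== PORT B =====
-- `n > 0 and any(all(m[j] == code[(i+j) % n] for j in range(len(m))) for i in range(played - len(m) + 1))`
-- (indices are always in range where Python B evaluates them, so getD's default is never read)
def pvModMatch (mc codeC : List Char) (time : Int) : Bool :=
  let n := codeC.length
  let played : Int := if 0 < time then time else 0
  (PySem.List.pyRange 0 (played - mc.length + 1) 1).any (fun i =>
    (List.range mc.length).all (fun j =>
      mc.getD j ' ' == codeC.getD ((i.toNat + j) % n) ' '))

def solution_alt (m : String) (musicinfos : List String) : String :=
  let mc := pvCanon m.toList
  let candidates : List (Int × Int × String) := musicinfos.filterMap (fun musicinfo =>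
    match pvParse? musicinfo with
    | none => none
    | some (time, startMin, title, codeC) =>
      if 0 < codeC.length ∧ pvModMatch mc codeC time = true then some (time, startMin, title)
      else none)
  match PySem.List.max2? candidates (fun c => c.1) (fun c => -c.2.1) with
  | none => "(None)"
  | some c => c.2.2

-- ===== PRECONDITION & SPEC =====
-- Pre_ excludes exactly the lines on which Python A raises: a line that does not split into
-- 4 comma fields (unpack ValueError), a time field that is not I:I with int-parsable parts
-- (ValueError), or an empty code field (ZeroDivisionError in time // len(code)).
def pvTimeOk (s : String) : Bool :=
  match PySem.Str.split? s ":" with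
  | some [a, b] => (PySem.Int.ofStr? a).isSome && (PySem.Int.ofStr? b).isSome
  | _ => false

def pvLineOk (line : String) : Bool :=
  match PySem.Str.split? line "," with
  | some [start, stop, _, code] => pvTimeOk start && pvTimeOk stop && code != ""
  | _ => false

def Pre_solution (m : String) (musicinfos : List String) : Prop :=
  musicinfos.all pvLineOk = true

instance (m : String) (musicinfos : List String) : Decidable (Pre_solution m musicinfos) := by
  unfold Pre_solution; infer_instance

def pvWitness_solution : String × List String := ("ABC", ["12:00,12:14,HELLO,C#DEF", "12:00,12:04,WORLD,ABCA#"])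

def Spec_solution (m : String) (musicinfos : List String) (out : String) : Prop := out = solution_alt m musicinfos
instance (m : String) (musicinfos : List String) (out : String) : Decidable (Spec_solution m musicinfos out) := by unfold Spec_solution; infer_instance

-- ===== CLAIM (what is proved, stated in full; the proofs are below) =====
def Claim_equal_solution : Prop := ∀ (m : String) (musicinfos : List String), Dom_solution m musicinfos → Pre_solution m musicinfos → Spec_solution m musicinfos (solution m musicinfos)

-- ===== LEMMAS AND PROOFS =====

-- repeated code indexed modulo the period
theorem pv_getD_flatten_replicate (cc : List Char) (hn : 0 < cc.length) :
    ∀ (k p : Nat), p < k * cc.length →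
      (List.replicate k cc).flatten.getD p ' ' = cc.getD (p % cc.length) ' ' := by
  intro k
  induction k with
  | zero => intro p hp; omega
  | succ k ih =>
    intro p hp
    simp only [List.replicate_succ, List.flatten_cons]
    by_cases h : p < cc.length
    · rw [List.getD_append _ _ _ _ h, Nat.mod_eq_of_lt h]
    · have h' : cc.length ≤ p := Nat.le_of_not_lt h
      have hp' : p - cc.length < k * cc.length := by
        simp only [Nat.succ_mul] at hp; omega
      rw [List.getD_append_right _ _ _ _ h', ih (p - cc.length) hp', ← Nat.mod_eq_sub_mod h']

-- the truncated repetition is empty when time ≤ 0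
theorem pv_code_of_nonpos (cc : List Char) (hn : 0 < cc.length) (t : Int) (ht : t ≤ 0) :
    PySem.Chars.slice (PySem.List.pyRepeat cc (PySem.Int.floordiv t (cc.length : Int) + 1)) none (some t) = [] := by
  rcases eq_or_lt_of_le ht with h0 | hneg
  · subst h0
    simp [PySem.Chars.slice_eq_listSlice, PySem.List.slice_to _ (le_refl (0 : Int))]
  · have hq : PySem.Int.floordiv t (cc.length : Int) < 0 := by
      rw [PySem.Int.floordiv_lt_iff_lt_mul (by exact_mod_cast hn)]
      simpa using hneg
    have h0 : (PySem.Int.floordiv t (cc.length : Int) + 1).toNat = 0 := by omega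
    simp [PySem.List.pyRepeat, h0, PySem.Chars.slice_eq_listSlice, PySem.List.slice]

-- the truncated repetition for 0 < time is take t.toNat of the flattened replication
theorem pv_code_of_pos (cc : List Char) (t : Int) (ht : 0 ≤ t) :
    PySem.Chars.slice (PySem.List.pyRepeat cc (PySem.Int.floordiv t (cc.length : Int) + 1)) none (some t)
      = ((List.replicate (PySem.Int.floordiv t (cc.length : Int) + 1).toNat cc).flatten).take t.toNat := by
  simp [PySem.List.pyRepeat, PySem.Chars.slice_eq_listSlice, PySem.List.slice_to _ ht]

-- prefix, characterised pointwise through getD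
theorem pv_prefix_iff (u v : List Char) :
    u <+: v ↔ u.length ≤ v.length ∧ ∀ j, j < u.length → u.getD j ' ' = v.getD j ' ' := by
  constructor
  · intro h
    refine ⟨h.length_le, fun j hj => ?_⟩
    have hj2 : j < v.length := lt_of_lt_of_le hj h.length_le
    rw [List.getD_eq_getElem u ' ' hj, List.getD_eq_getElem v ' ' hj2]
    exact h.getElem hj
  · rintro ⟨hlen, hch⟩
    rw [List.prefix_iff_eq_take]
    apply List.ext_getElem
    · simp [Nat.min_eq_left hlen]
    · intro j h1 h2
      have h2' : j < v.length := by omega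
      rw [List.getElem_take]
      have := hch j h1
      rwa [List.getD_eq_getElem u ' ' h1, List.getD_eq_getElem v ' ' h2'] at this

-- A's stretched-substring test agrees with B's modular index test (0 < len(code))
theorem pv_match_eq (mc cc : List Char) (hn : 0 < cc.length) (t : Int) :
    PySem.Chars.isIn mc (PySem.Chars.slice (PySem.List.pyRepeat cc (PySem.Int.floordiv t (cc.length : Int) + 1)) none (some t))
      = pvModMatch mc cc t := by
  rw [Bool.eq_iff_iff, ← PySem.Chars.exists_prefix_drop_iff_isIn]
  unfold pvModMatch
  simp only [List.any_eq_true, List.all_eq_true, PySem.List.mem_pyRange_one, List.mem_range,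
    beq_iff_eq]
  by_cases ht : 0 < t
  · rw [pv_code_of_pos cc t (le_of_lt ht), if_pos ht]
    set K := (PySem.Int.floordiv t (cc.length : Int) + 1).toNat with hK
    set F := (List.replicate K cc).flatten with hF
    have hq0 : 0 ≤ PySem.Int.floordiv t (cc.length : Int) := by
      rw [PySem.Int.le_floordiv_iff_mul_le (by exact_mod_cast hn)]
      omega
    have hFlen : F.length = K * cc.length := by
      simp [hF, List.length_flatten, List.map_replicate, List.sum_replicate, smul_eq_mul]
    have htK : t.toNat ≤ K * cc.length := by
      have hmul : PySem.Int.floordiv t (cc.length : Int) * (cc.length : Int)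
          + PySem.Int.mod t (cc.length : Int) = t := PySem.Int.floordiv_mul_add_mod t _
      have hmlt : PySem.Int.mod t (cc.length : Int) < (cc.length : Int) :=
        PySem.Int.mod_lt _ (by exact_mod_cast hn)
      have hcast : ((K * cc.length : Nat) : Int)
          = (PySem.Int.floordiv t (cc.length : Int) + 1) * (cc.length : Int) := by
        push_cast [hK, Int.toNat_of_nonneg (by omega : (0:Int) ≤ PySem.Int.floordiv t (cc.length : Int) + 1)]
        ring
      have : t < ((K * cc.length : Nat) : Int) := by rw [hcast]; nlinarith [hmul, hmlt]
      omega
    have hSlen : (F.take t.toNat).length = t.toNat := by simp [hFlen]; omega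
    have hSget : ∀ j jj, j + jj < t.toNat →
        (List.drop j (F.take t.toNat)).getD jj ' ' = cc.getD ((j + jj) % cc.length) ' ' := by
      intro j jj hlt
      have h1 : jj < (List.drop j (F.take t.toNat)).length := by simp [hSlen]; omega
      rw [List.getD_eq_getElem _ _ h1, List.getElem_drop, List.getElem_take,
        ← List.getD_eq_getElem F ' ' (show j + jj < F.length by rw [hFlen]; omega)]
      exact pv_getD_flatten_replicate cc hn K (j + jj) (by omega)
    constructor
    · rintro ⟨j, hpre⟩
      rw [pv_prefix_iff] at hpre
      obtain ⟨hlen, hch⟩ := hpre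
      have hdlen : (List.drop j (F.take t.toNat)).length = t.toNat - j := by simp [hSlen]
      by_cases hL : mc.length = 0
      · refine ⟨0, ⟨le_refl 0, by push_cast [hL]; omega⟩, fun jj hjj => absurd hjj (by omega)⟩
      · have hjle : j + mc.length ≤ t.toNat := by rw [hdlen] at hlen; omega
        refine ⟨(j : Int), ⟨by positivity, by omega⟩, ?_⟩
        intro jj hjj
        have h1 := hch jj hjj
        rw [hSget j jj (by omega)] at h1
        simpa using h1
    · rintro ⟨i, ⟨hi0, hiu⟩, hP⟩
      refine ⟨i.toNat, ?_⟩
      rw [pv_prefix_iff]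
      have hiL : i.toNat + mc.length ≤ t.toNat := by omega
      constructor
      · simp [hSlen]; omega
      · intro jj hjj
        rw [hSget i.toNat jj (by omega)]
        exact hP jj hjj
  · rw [pv_code_of_nonpos cc hn t (by omega), if_neg ht]
    constructor
    · rintro ⟨j, hpre⟩
      rw [List.drop_nil] at hpre
      have hmc := List.prefix_nil.mp hpre
      refine ⟨0, ⟨le_refl 0, by simp [hmc]⟩, fun jj hjj => ?_⟩
      rw [hmc] at hjj; simp at hjj
    · rintro ⟨i, ⟨hi0, hiu⟩, _⟩
      have hL : mc.length = 0 := by omega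
      exact ⟨0, by simp [List.eq_nil_of_length_eq_zero hL]⟩

-- the running-best step of max2? with keys (time, -start), named
def pvBest (acc : Option (Int × Int × String)) (c : Int × Int × String) : Option (Int × Int × String) :=
  match acc with
  | none => some c
  | some a =>
    if (decide (a.1 < c.1) || !decide (c.1 < a.1) && decide (-a.2.1 < -c.2.1)) = true then some c
    else some a

theorem pv_max2_eq (xs : List (Int × Int × String)) :
    PySem.List.max2? xs (fun c => c.1) (fun c => -c.2.1) = xs.foldl pvBest none := by
  unfold PySem.List.max2?
  apply List.foldl_ext
  intro acc c _
  unfold pvBest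
  rcases acc with _ | a <;> rfl

-- a fold that skips the `none` lines is the fold over the filterMap of its lines
theorem pv_foldl_filterMap_skip {α β γ : Type} (f : α → Option β) (g : γ → β → γ) :
    ∀ (l : List α) (acc : γ),
      l.foldl (fun a x => match f x with | none => a | some c => g a c) acc
        = (l.filterMap f).foldl g acc := by
  intro l
  induction l with
  | nil => intro acc; rfl
  | cons x t ih =>
    intro acc
    cases h : f x <;> simp [h, ih]

theorem pv_solution_eq (m : String) (musicinfos : List String) :
    solution m musicinfos = solution_alt m musicinfos := by
  simp only [solution, solution_alt]
  rw [pv_max2_eq, ← pv_foldl_filterMap_skip]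
  congr 1
  apply List.foldl_ext
  intro acc x _
  rcases h : pvParse? x with _ | ⟨time, startMin, title, codeC⟩
  · rfl
  · by_cases hz : codeC.length = 0
    · simp [hz]
    · have hn : 0 < codeC.length := Nat.pos_of_ne_zero hz
      simp only [hz, if_false]
      rw [pv_match_eq (pvCanon m.toList) codeC hn time]
      by_cases hin : pvModMatch (pvCanon m.toList) codeC time = true
      · simp only [hin, hn, and_true, if_true, pvBest]
        cases acc with
        | none => rfl
        | some a =>
          simp only [Bool.or_eq_true, Bool.and_eq_true, Bool.not_eq_true', decide_eq_true_eq,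
            decide_eq_false_iff_not]
          split_ifs <;> first | rfl | omega
      · simp [hin]

-- ===== VERDICT (by name: the statement is the Claim_ definition above) =====
theorem solution_spec : Claim_equal_solution := by
  intro m musicinfos _ _
  unfold Spec_solution
  exact pv_solution_eq m musicinfos
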